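-- pv_equiv track=rewrite | github.com/cyiyu/Google-Foobar-Challenge | gearing-up-for-destruction.py | checkRadii
-- ===== SOURCE A (Python) =====
-- def checkRadii(pegs, firstRadius):
--     pointer = firstRadius
--     for i in range(1, len(pegs)):
--         disToNext = pegs[i] - pegs[i-1]
--         nextRadius = disToNext - pointer
--         if nextRadius < 1:
--             return False
--         pointer = nextRadius
--     return True
-- ===== SOURCE B (Python) =====
-- def checkRadii(pegs, firstRadius):
--     # Alternating-prefix-sum formulation: radius_i = (firstRadius + alt_i) * sign_i,
--     # where alt is the signed prefix sum of consecutive peg gaps.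
--     radii = []
--     alt = 0
--     sign = 1
--     for prev, cur in zip(pegs, pegs[1:]):
--         sign = -sign
--         alt += (cur - prev) * sign
--         radii.append((firstRadius + alt) * sign)
--     return all(r >= 1 for r in radii)
-- ===== Notes on version B (the rewrite author's own statement) =====
-- stated objective: alternative
-- what changed: Replaces A's sequential pointer recurrence and early return with a closed-form per-index radius via an alternating prefix sum of consecutive gaps, building the full radii list and checking all(r >= 1).
import Mathlib
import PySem

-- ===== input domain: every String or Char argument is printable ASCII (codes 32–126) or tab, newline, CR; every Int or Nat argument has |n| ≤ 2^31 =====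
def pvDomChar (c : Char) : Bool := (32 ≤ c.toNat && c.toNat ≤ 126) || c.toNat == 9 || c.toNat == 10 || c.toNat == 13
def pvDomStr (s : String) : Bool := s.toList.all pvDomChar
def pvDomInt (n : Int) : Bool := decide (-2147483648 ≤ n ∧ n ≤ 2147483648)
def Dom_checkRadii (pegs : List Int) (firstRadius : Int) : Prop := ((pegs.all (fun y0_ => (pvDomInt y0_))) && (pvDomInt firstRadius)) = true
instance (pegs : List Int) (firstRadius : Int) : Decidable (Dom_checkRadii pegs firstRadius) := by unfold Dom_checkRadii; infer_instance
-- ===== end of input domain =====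

-- B replaces A's sequential pointer recurrence by a closed-form radius per index
-- via an alternating prefix sum of the consecutive gaps (objective: alternative).

-- ===== PORT A =====
-- A's loop over i = 1 .. len(pegs)-1 reads pegs[i-1], pegs[i]: walk adjacent elements.
def checkRadii (pegs : List Int) (firstRadius : Int) : Bool :=
  match pegs, firstRadius with
  | p0 :: p1 :: rest, pointer =>
      let disToNext := p1 - p0
      let nextRadius := disToNext - pointer
      if nextRadius < 1 then false
      else checkRadii (p1 :: rest) nextRadius
  | _, _ => true

-- ===== PORT B =====
-- one fold step of B's loop: flip sign, extend the alternating prefix sum, append the radius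
def altStep (firstRadius : Int) (st : Int × Int × List Int) (pq : Int × Int) : Int × Int × List Int :=
  let sign := -st.2.1
  let alt := st.1 + (pq.2 - pq.1) * sign
  (alt, sign, st.2.2 ++ [(firstRadius + alt) * sign])

def checkRadii_alt (pegs : List Int) (firstRadius : Int) : Bool :=
  let pairs := pegs.zip (PySem.List.slice pegs (some 1) none)   -- zip(pegs, pegs[1:])
  let radii := (pairs.foldl (altStep firstRadius) (0, 1, [])).2.2
  radii.all (fun r => decide (1 ≤ r))

-- ===== PRECONDITION & SPEC =====
def Spec_checkRadii (pegs : List Int) (firstRadius : Int) (out : Bool) : Prop := out = checkRadii_alt pegs firstRadius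
instance (pegs : List Int) (firstRadius : Int) (out : Bool) : Decidable (Spec_checkRadii pegs firstRadius out) := by unfold Spec_checkRadii; infer_instance

-- ===== CLAIM (what is proved, stated in full; the proofs are below) =====
def Claim_equal_checkRadii : Prop := ∀ (pegs : List Int) (firstRadius : Int), Dom_checkRadii pegs firstRadius → Spec_checkRadii pegs firstRadius (checkRadii pegs firstRadius)

-- ===== LEMMAS AND PROOFS =====

-- A's recursion restated over the adjacent-pair list
def aGo : List (Int × Int) → Int → Bool
  | [], _ => true
  | (p0, p1) :: rest, pointer =>
      let nr := (p1 - p0) - pointer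
      if nr < 1 then false else aGo rest nr

lemma checkRadii_eq_aGo (pegs : List Int) (fr : Int) :
    checkRadii pegs fr = aGo (pegs.zip (pegs.drop 1)) fr := by
  induction pegs generalizing fr with
  | nil => rfl
  | cons p0 rest ih =>
    cases rest with
    | nil => rfl
    | cons p1 rest' =>
      simp only [checkRadii, List.drop, List.zip_cons_cons, aGo]
      split
      · rfl
      · exact ih _

lemma altFold_inv (fr : Int) (pairs : List (Int × Int)) :
    ∀ (alt sign : Int) (acc : List Int), sign * sign = 1 →
      ((pairs.foldl (altStep fr) (alt, sign, acc)).2.2.all (fun r => decide (1 ≤ r)))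
        = (acc.all (fun r => decide (1 ≤ r)) && aGo pairs ((fr + alt) * sign)) := by
  induction pairs with
  | nil => intro alt sign acc _; simp [aGo]
  | cons pq rest ih =>
    intro alt sign acc hs
    obtain ⟨p, q⟩ := pq
    have hnr : (fr + (alt + (q - p) * -sign)) * -sign = (q - p) - (fr + alt) * sign := by
      have h : (fr + (alt + (q - p) * -sign)) * -sign
          = (q - p) * (sign * sign) - (fr + alt) * sign := by ring
      rw [h, hs, mul_one]
    rw [List.foldl_cons]
    show ((rest.foldl (altStep fr)
        (alt + (q - p) * -sign, -sign, acc ++ [(fr + (alt + (q - p) * -sign)) * -sign])).2.2.all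
        (fun r => decide (1 ≤ r))) = _
    rw [ih _ _ _ (by rw [neg_mul_neg]; exact hs), hnr]
    simp only [aGo, List.all_append, List.all_cons, List.all_nil]
    by_cases h : (q - p) - (fr + alt) * sign < 1
    · simp [h, show ¬ (1 ≤ (q - p) - (fr + alt) * sign) from by omega]
    · simp [h, show (1 ≤ (q - p) - (fr + alt) * sign) from by omega]

-- ===== VERDICT (by name: the statement is the Claim_ definition above) =====
theorem checkRadii_spec : Claim_equal_checkRadii := by
  intro pegs fr _
  show checkRadii pegs fr = checkRadii_alt pegs fr
  rw [checkRadii_eq_aGo]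
  unfold checkRadii_alt
  rw [PySem.List.slice_from_one]
  have := altFold_inv fr (pegs.zip pegs.tail) 0 1 [] (by norm_num)
  simp only [List.all_nil, Bool.true_and, add_zero, mul_one] at this
  rw [this, List.drop_one]
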